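-- pv_equiv track=rewrite | github.com/HassanSalah120/Best-Practices-Doctor | backend/core/pipeline/stage_cache.py | _is_excluded
-- ===== SOURCE A (Python) =====
-- _DEFAULT_EXCLUDES = {
--     ".git",
--     "node_modules",
--     "vendor",
--     ".idea",
--     ".vscode",
--     "storage",
--     "bootstrap/cache",
--     ".bpdoctor",
-- }
--
-- def _is_excluded(rel: str) -> bool:
--     rel_norm = str(rel or "").replace("\\", "/").strip("/")
--     if not rel_norm:
--         return True
--     parts = rel_norm.split("/")
--     for i in range(len(parts)):
--         prefix = "/".join(parts[: i + 1])
--         if prefix in _DEFAULT_EXCLUDES: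
--             return True
--     return False
-- ===== SOURCE B (Python) =====
-- _SINGLE_EXCLUDES = {
--     ".git",
--     "node_modules",
--     "vendor",
--     ".idea",
--     ".vscode",
--     "storage",
--     ".bpdoctor",
-- }
--
-- def _is_excluded(rel: str) -> bool:
--     rel_norm = str(rel or "").replace("\\", "/").strip("/")
--     if not rel_norm:
--         return True
--     # Only the first segment can match a single-segment exclude, and only
--     # "bootstrap/cache" is a two-segment exclude: inspect at most two segments.
--     first, sep, rest = rel_norm.partition("/")
--     if first in _SINGLE_EXCLUDES:
--         return True
--     if first != "bootstrap" or not sep: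
--         return False
--     second, _, _ = rest.partition("/")
--     return second == "cache"
-- ===== Notes on version B (the rewrite author's own statement) =====
-- stated objective: alternative
-- what changed: Instead of splitting the path into all segments and testing every cumulative '/'-joined prefix against the set, B exploits that the fixed exclude set has only one two-segment entry: it partitions off the first segment, checks it against the seven single-segment excludes, and only when it is 'bootstrap' partitions off the second segment and compares it with 'cache' - a constant number of checks with no prefix enumeration or joins.
import Mathlib
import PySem

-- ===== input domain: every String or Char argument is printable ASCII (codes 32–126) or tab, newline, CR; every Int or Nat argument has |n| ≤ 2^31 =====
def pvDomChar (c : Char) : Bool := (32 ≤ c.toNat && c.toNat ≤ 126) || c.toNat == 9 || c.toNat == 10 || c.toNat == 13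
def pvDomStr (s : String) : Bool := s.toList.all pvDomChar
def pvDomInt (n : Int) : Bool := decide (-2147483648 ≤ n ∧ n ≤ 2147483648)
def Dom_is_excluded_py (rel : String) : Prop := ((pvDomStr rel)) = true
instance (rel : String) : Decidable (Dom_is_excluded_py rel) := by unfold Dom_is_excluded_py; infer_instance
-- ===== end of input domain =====

-- B replaces A's enumeration of all cumulative '/'-joined prefixes: the fixed exclude set
-- has only one two-segment entry, so B partitions off at most the first two segments and
-- performs a constant number of comparisons (objective: alternative decomposition).

-- ===== PORT A =====
-- the module constant _DEFAULT_EXCLUDES (a set of strings), as a PySem.Set of char lists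
def pvExcludes : PySem.Set (List Char) :=
  PySem.Set.ofList
    [".git".toList, "node_modules".toList, "vendor".toList, ".idea".toList,
     ".vscode".toList, "storage".toList, "bootstrap/cache".toList, ".bpdoctor".toList]

def is_excluded_py (rel : String) : Bool :=
  -- rel_norm = str(rel or "").replace("\\", "/").strip("/")  ('rel or ""' is 'rel' unless rel == "", and then '""' — the identity either way)
  let relNorm : List Char := PySem.Chars.stripChars (PySem.Chars.replace rel.toList ['\\'] ['/']) ['/']
  -- if not rel_norm: return True
  if relNorm.isEmpty then true
  else
    -- parts = rel_norm.split("/")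
    let parts := PySem.Chars.splitOn relNorm ['/']
    -- for i in range(len(parts)): if "/".join(parts[:i + 1]) in _DEFAULT_EXCLUDES: return True ... return False
    (PySem.List.pyRange 0 parts.length 1).any (fun i =>
      pvExcludes.contains (PySem.Chars.join ['/'] (PySem.List.slice parts none (some (i + 1)))))

-- ===== PORT B =====
-- B's _SINGLE_EXCLUDES set (the seven single-segment excludes)
def pvSingles : PySem.Set (List Char) :=
  PySem.Set.ofList
    [".git".toList, "node_modules".toList, "vendor".toList, ".idea".toList,
     ".vscode".toList, "storage".toList, ".bpdoctor".toList]

-- s.partition("/") ported by hand (exact for the one-character separator '/'):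
-- (text before the first '/', whether a '/' occurs, text after it)
def pvPartSlash (cs : List Char) : List Char × Bool × List Char :=
  match cs.dropWhile (fun c => c ≠ '/') with
  | [] => (cs.takeWhile (fun c => c ≠ '/'), false, [])
  | _ :: r => (cs.takeWhile (fun c => c ≠ '/'), true, r)

def is_excluded_py_alt (rel : String) : Bool :=
  let relNorm : List Char := PySem.Chars.stripChars (PySem.Chars.replace rel.toList ['\\'] ['/']) ['/']
  if relNorm.isEmpty then true
  else
    -- first, sep, rest = rel_norm.partition("/")
    let p := pvPartSlash relNorm
    -- if first in _SINGLE_EXCLUDES: return True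
    if pvSingles.contains p.1 then true
    -- if first != "bootstrap" or not sep: return False
    else if p.1 != "bootstrap".toList || !p.2.1 then false
    -- second, _, _ = rest.partition("/"); return second == "cache"
    else (pvPartSlash p.2.2).1 == "cache".toList

-- ===== PRECONDITION & SPEC =====
def Spec_is_excluded_py (rel : String) (out : Bool) : Prop := out = is_excluded_py_alt rel
instance (rel : String) (out : Bool) : Decidable (Spec_is_excluded_py rel out) := by unfold Spec_is_excluded_py; infer_instance

-- ===== CLAIM (what is proved, stated in full; the proofs are below) =====
def Claim_equal_is_excluded_py : Prop := ∀ (rel : String), Dom_is_excluded_py rel → Spec_is_excluded_py rel (is_excluded_py rel)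

-- ===== LEMMAS AND PROOFS =====

-- 'exc excludes cs': cs equals exc or continues it past a '/' boundary
def pvHit (exc cs : List Char) : Prop := cs = exc ∨ ∃ r, cs = exc ++ '/' :: r

-- the full exclude list, for the proofs
def pvAllExcludes : List (List Char) :=
  [".git".toList, "node_modules".toList, "vendor".toList, ".idea".toList,
   ".vscode".toList, "storage".toList, "bootstrap/cache".toList, ".bpdoctor".toList]

-- proof-only model of splitting on '/': (first segment, remaining segments)
def pvSplit : List Char → List Char × List (List Char)
  | [] => ([], [])
  | c :: t =>
    let p := pvSplit t
    if c = '/' then ([], p.1 :: p.2) else (c :: p.1, p.2)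

-- proof-only model of "/".join on a nonempty parts list (head, tail of the parts)
def pvJoinParts : List Char → List (List Char) → List Char
  | h, [] => h
  | h, x :: xs => h ++ '/' :: pvJoinParts x xs

theorem pv_go_eq (fuel : Nat) : ∀ (l cur : List Char) (acc : List (List Char)), l.length ≤ fuel →
    PySem.Chars.splitOn.go ['/'] fuel l cur acc
      = acc.reverse ++ ((cur.reverse ++ (pvSplit l).1) :: (pvSplit l).2) := by
  induction fuel with
  | zero =>
    intro l cur acc h
    have : l = [] := by cases l <;> simp_all
    subst this
    simp [PySem.Chars.splitOn.go, pvSplit]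
  | succ f ih =>
    intro l cur acc h
    cases l with
    | nil => simp [PySem.Chars.splitOn.go, pvSplit]
    | cons c rest =>
      rw [PySem.Chars.splitOn.go]
      have hlen : rest.length ≤ f := by simpa using h
      by_cases hc : c = '/'
      · subst hc
        simp only [List.isPrefixOf, Bool.and_true, beq_self_eq_true, if_pos]
        rw [show List.drop (['/'].length) ('/' :: rest) = rest from rfl]
        rw [ih _ _ _ hlen]
        simp [pvSplit]
      · have : (['/'].isPrefixOf (c :: rest)) = false := by
          simp [List.isPrefixOf]
          exact fun h' => hc h'.symm
        rw [if_neg (by simp [this])]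
        rw [ih _ _ _ hlen]
        simp [pvSplit, hc]

theorem pv_splitOn_eq (cs : List Char) :
    PySem.Chars.splitOn cs ['/'] = (pvSplit cs).1 :: (pvSplit cs).2 := by
  unfold PySem.Chars.splitOn
  rw [pv_go_eq (cs.length + 1) cs [] [] (by omega)]
  simp

theorem pv_join_eq (h : List Char) (r : List (List Char)) :
    PySem.Chars.join ['/'] (h :: r) = pvJoinParts h r := by
  induction r generalizing h with
  | nil => simp [PySem.Chars.join, List.intercalate, pvJoinParts]
  | cons x xs ih =>
    rw [pvJoinParts]
    rw [← ih x]
    simp [PySem.Chars.join, List.intercalate, List.intersperse]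

theorem pvJoinParts_cons (c : Char) (h : List Char) (r : List (List Char)) :
    pvJoinParts (c :: h) r = c :: pvJoinParts h r := by
  cases r <;> simp [pvJoinParts]

-- the k-th cumulative '/'-joined prefix of cs, as a function of the input
def pvPref (cs : List Char) (k : Nat) : List Char :=
  pvJoinParts (pvSplit cs).1 ((pvSplit cs).2.take k)

-- the cumulative joined prefixes of cs are exactly the p with pvHit p cs
theorem pv_char (cs : List Char) : ∀ (p : List Char),
    (∃ k, k ≤ (pvSplit cs).2.length ∧ p = pvPref cs k) ↔ pvHit p cs := by
  induction cs with
  | nil =>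
    intro p
    constructor
    · rintro ⟨k, hk, rfl⟩
      simp only [pvSplit, List.length_nil, Nat.le_zero] at hk
      subst hk
      left; simp [pvPref, pvSplit, pvJoinParts]
    · rintro (rfl | ⟨rest, hrest⟩)
      · exact ⟨0, by simp [pvSplit], by simp [pvPref, pvSplit, pvJoinParts]⟩
      · simp at hrest
  | cons c t ih =>
    intro p
    by_cases hc : c = '/'
    · subst hc
      have hsplit : pvSplit ('/' :: t) = ([], (pvSplit t).1 :: (pvSplit t).2) := by
        simp [pvSplit]
      have hlen : (pvSplit ('/' :: t)).2.length = (pvSplit t).2.length + 1 := by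
        rw [hsplit]; simp
      have hp0 : pvPref ('/' :: t) 0 = [] := by simp [pvPref, hsplit, pvJoinParts]
      have hps : ∀ k, pvPref ('/' :: t) (k + 1) = '/' :: pvPref t k := by
        intro k; simp [pvPref, hsplit, pvJoinParts]
      constructor
      · rintro ⟨k, hk, rfl⟩
        cases k with
        | zero => right; exact ⟨t, by simp [hp0]⟩
        | succ k' =>
          rw [hlen] at hk
          rw [hps k']
          rcases (ih (pvPref t k')).mp ⟨k', by omega, rfl⟩ with h1 | ⟨rest, hrest⟩
          · left; exact congrArg ('/' :: ·) h1
          · right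
            refine ⟨rest, ?_⟩
            rw [List.cons_append]
            exact congrArg ('/' :: ·) hrest
      · rintro (rfl | ⟨rest, hrest⟩)
        · obtain ⟨k, hk, hEq⟩ := (ih t).mpr (Or.inl rfl)
          refine ⟨k + 1, by omega, ?_⟩
          rw [hps k]
          exact congrArg ('/' :: ·) hEq
        · cases p with
          | nil => exact ⟨0, by omega, hp0.symm⟩
          | cons d q =>
            simp only [List.cons_append, List.cons.injEq] at hrest
            obtain ⟨rfl, hrest⟩ := hrest
            obtain ⟨k, hk, hEq⟩ := (ih q).mpr (Or.inr ⟨rest, hrest⟩)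
            refine ⟨k + 1, by omega, ?_⟩
            rw [hps k]
            exact congrArg ('/' :: ·) hEq
    · have hsplit : pvSplit (c :: t) = (c :: (pvSplit t).1, (pvSplit t).2) := by
        simp [pvSplit, hc]
      have hlen : (pvSplit (c :: t)).2.length = (pvSplit t).2.length := by
        rw [hsplit]
      have hps : ∀ k, pvPref (c :: t) k = c :: pvPref t k := by
        intro k; simp [pvPref, hsplit, pvJoinParts_cons]
      constructor
      · rintro ⟨k, hk, rfl⟩
        rw [hlen] at hk
        rw [hps k]
        rcases (ih (pvPref t k)).mp ⟨k, hk, rfl⟩ with h1 | ⟨rest, hrest⟩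
        · left; exact congrArg (c :: ·) h1
        · right
          refine ⟨rest, ?_⟩
          rw [List.cons_append]
          exact congrArg (c :: ·) hrest
      · rintro (rfl | ⟨rest, hrest⟩)
        · obtain ⟨k, hk, hEq⟩ := (ih t).mpr (Or.inl rfl)
          refine ⟨k, by omega, ?_⟩
          rw [hps k]
          exact congrArg (c :: ·) hEq
        · cases p with
          | nil =>
            simp only [List.nil_append, List.cons.injEq] at hrest
            exact absurd hrest.1 hc
          | cons d q =>
            simp only [List.cons_append, List.cons.injEq] at hrest
            obtain ⟨rfl, hrest⟩ := hrest
            obtain ⟨k, hk, hEq⟩ := (ih q).mpr (Or.inr ⟨rest, hrest⟩)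
            refine ⟨k, by omega, ?_⟩
            rw [hps k]
            exact congrArg (c :: ·) hEq

theorem pv_mem_excludes (x : List Char) : x ∈ pvExcludes ↔ x ∈ pvAllExcludes := by
  unfold pvExcludes pvAllExcludes
  exact PySem.Set.mem_ofList _ x

-- A's loop answers exactly 'some exclude hits cs'
theorem pv_A_iff (cs : List Char) :
    ((PySem.List.pyRange 0 (PySem.Chars.splitOn cs ['/']).length 1).any (fun i =>
        pvExcludes.contains (PySem.Chars.join ['/']
          (PySem.List.slice (PySem.Chars.splitOn cs ['/']) none (some (i + 1))))) = true)
      ↔ ∃ exc ∈ pvAllExcludes, pvHit exc cs := by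
  simp only [List.any_eq_true, PySem.List.mem_pyRange_one, PySem.Set.contains_iff,
    pv_mem_excludes]
  constructor
  · rintro ⟨i, ⟨h0, hn⟩, hmem⟩
    obtain ⟨k, rfl⟩ : ∃ k : Nat, i = (k : Int) := ⟨i.toNat, by omega⟩
    rw [pv_splitOn_eq] at hn hmem
    simp only [List.length_cons] at hn
    have hk : k ≤ (pvSplit cs).2.length := by exact_mod_cast Nat.lt_succ_iff.mp (by exact_mod_cast hn)
    rw [show ((k : Int) + 1) = ((k + 1 : Nat) : Int) by push_cast; ring,
      PySem.List.slice_to_natCast] at hmem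
    rw [List.take_succ_cons, pv_join_eq] at hmem
    have hjoin : pvJoinParts (pvSplit cs).1 ((pvSplit cs).2.take k) = pvPref cs k := rfl
    rw [hjoin] at hmem
    exact ⟨pvPref cs k, hmem, (pv_char cs (pvPref cs k)).mp ⟨k, hk, rfl⟩⟩
  · rintro ⟨exc, hmem, hhit⟩
    obtain ⟨k, hk, hEq⟩ := (pv_char cs exc).mpr hhit
    refine ⟨(k : Int), ⟨by omega, ?_⟩, ?_⟩
    · rw [pv_splitOn_eq]; simp; omega
    · rw [pv_splitOn_eq]
      rw [show ((k : Int) + 1) = ((k + 1 : Nat) : Int) by push_cast; ring,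
        PySem.List.slice_to_natCast, List.take_succ_cons, pv_join_eq]
      show pvPref cs k ∈ pvAllExcludes
      rw [← hEq]
      exact hmem

-- takeWhile picks out exactly the hits of a slash-free exclude
theorem pv_tw_hit (exc : List Char) (hns : '/' ∉ exc) (cs : List Char) :
    (cs.takeWhile (fun c => decide (c ≠ '/')) = exc) ↔ pvHit exc cs := by
  induction cs generalizing exc with
  | nil =>
    simp only [List.takeWhile_nil, pvHit]
    constructor
    · rintro rfl; exact Or.inl rfl
    · rintro (h | ⟨r, hr⟩)
      · exact h
      · exact absurd hr (by simp)
  | cons c t ih =>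
    by_cases hc : c = '/'
    · subst hc
      simp only [List.takeWhile_cons, decide_eq_true_eq]
      rw [if_neg (by simp)]
      constructor
      · rintro rfl
        exact Or.inr ⟨t, rfl⟩
      · rintro (h | ⟨r, hr⟩)
        · exact absurd (h ▸ (List.mem_cons_self : '/' ∈ '/' :: t)) hns
        · cases exc with
          | nil => rfl
          | cons e es =>
            simp only [List.cons_append, List.cons.injEq] at hr
            exact absurd (hr.1 ▸ List.mem_cons_self) hns
    · simp only [List.takeWhile_cons, decide_eq_true_eq]
      rw [if_pos hc]
      cases exc with
      | nil =>
        simp only [pvHit]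
        constructor
        · intro h; exact absurd h (by simp)
        · rintro (h | ⟨r, hr⟩)
          · exact absurd h (by simp)
          · simp only [List.nil_append] at hr
            injection hr with h1 _
            exact absurd h1 hc
      | cons e es =>
        have hns' : '/' ∉ es := fun h => hns (List.mem_cons_of_mem _ h)
        constructor
        · intro h
          obtain ⟨rfl, h2⟩ : c = e ∧ t.takeWhile (fun c => decide (c ≠ '/')) = es := by
            simpa using h
          rcases (ih es hns').mp h2 with h3 | ⟨r, hr⟩
          · exact Or.inl (by rw [h3])
          · exact Or.inr ⟨r, by rw [hr]; rfl⟩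
        · rintro (h | ⟨r, hr⟩)
          · obtain ⟨rfl, rfl⟩ : c = e ∧ t = es := by simpa using h
            exact congrArg (c :: ·) ((ih t hns').mpr (Or.inl rfl))
          · simp only [List.cons_append, List.cons.injEq] at hr
            obtain ⟨rfl, hr⟩ := hr
            exact congrArg (c :: ·) ((ih es hns').mpr (Or.inr ⟨r, hr⟩))

-- cutting cs at its first '/' identifies a slash-free head exactly
theorem pv_cut (a : List Char) (hns : '/' ∉ a) (cs r : List Char) :
    cs = a ++ '/' :: r
      ↔ cs.takeWhile (fun c => decide (c ≠ '/')) = a ∧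
        cs.dropWhile (fun c => decide (c ≠ '/')) = '/' :: r := by
  constructor
  · rintro rfl
    induction a with
    | nil => simp
    | cons e es ih =>
      have he : e ≠ '/' := fun h => hns (h ▸ List.mem_cons_self)
      have h2 := ih (fun h => hns (List.mem_cons_of_mem _ h))
      simp only [List.cons_append, List.takeWhile_cons, List.dropWhile_cons,
        decide_eq_true_eq] at *
      rw [if_pos he, if_pos he]
      exact ⟨by rw [h2.1], h2.2⟩
  · rintro ⟨h1, h2⟩
    conv_lhs => rw [← List.takeWhile_append_dropWhile (p := fun c => decide (c ≠ '/')) (l := cs)]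
    rw [h1, h2]

-- the head of the dropped suffix is the separator
theorem pv_drop_head : ∀ (cs : List Char) (x : Char) (r : List Char),
    cs.dropWhile (fun c => decide (c ≠ '/')) = x :: r → x = '/' := by
  intro cs
  induction cs with
  | nil => intro x r h; simp at h
  | cons c t ih =>
    intro x r h
    rw [List.dropWhile_cons] at h
    by_cases hc : c = '/'
    · rw [if_neg (by simp [hc])] at h
      exact ((List.cons.injEq _ _ _ _).mp h).1.symm.trans hc
    · rw [if_pos (by simp [hc])] at h
      exact ih x r h

-- the two-segment exclude "bootstrap/cache" hits cs iff B's two partitions say so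
theorem pv_hit2 (cs : List Char) :
    pvHit ("bootstrap/cache".toList) cs
      ↔ cs.takeWhile (fun c => decide (c ≠ '/')) = "bootstrap".toList ∧
        ∃ r, cs.dropWhile (fun c => decide (c ≠ '/')) = '/' :: r ∧
          r.takeWhile (fun c => decide (c ≠ '/')) = "cache".toList := by
  have hb : '/' ∉ "bootstrap".toList := by decide
  have hcch : '/' ∉ "cache".toList := by decide
  have hsc : "bootstrap/cache".toList = "bootstrap".toList ++ '/' :: "cache".toList := by decide
  constructor
  · rintro (rfl | ⟨r, rfl⟩)
    · have h := (pv_cut "bootstrap".toList hb ("bootstrap/cache".toList) "cache".toList).mp hsc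
      exact ⟨h.1, "cache".toList, h.2, (pv_tw_hit _ hcch _).mpr (Or.inl rfl)⟩
    · have hshape : "bootstrap/cache".toList ++ '/' :: r
          = "bootstrap".toList ++ '/' :: ("cache".toList ++ '/' :: r) := by
        rw [hsc]; simp
      have h := (pv_cut "bootstrap".toList hb _ ("cache".toList ++ '/' :: r)).mp hshape
      exact ⟨h.1, _, h.2, (pv_tw_hit _ hcch _).mpr (Or.inr ⟨r, rfl⟩)⟩
  · rintro ⟨h1, r, h2, h3⟩
    have hcs : cs = "bootstrap".toList ++ '/' :: r := (pv_cut _ hb cs r).mpr ⟨h1, h2⟩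
    rcases (pv_tw_hit _ hcch r).mp h3 with h4 | ⟨r', rfl⟩
    · exact Or.inl (by rw [hcs, h4, hsc])
    · exact Or.inr ⟨r', by rw [hcs, hsc]; simp⟩

-- the first component of pvPartSlash is always the slash-free head
theorem pv_part_fst (cs : List Char) :
    (pvPartSlash cs).1 = cs.takeWhile (fun c => decide (c ≠ '/')) := by
  unfold pvPartSlash
  split <;> rfl

-- the existential over the literal exclude list, as a plain disjunction
theorem pv_all_iff (cs : List Char) :
    (∃ exc ∈ pvAllExcludes, pvHit exc cs)
      ↔ (pvHit ".git".toList cs ∨ pvHit "node_modules".toList cs ∨ pvHit "vendor".toList cs ∨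
         pvHit ".idea".toList cs ∨ pvHit ".vscode".toList cs ∨ pvHit "storage".toList cs ∨
         pvHit "bootstrap/cache".toList cs ∨ pvHit ".bpdoctor".toList cs) := by
  simp [pvAllExcludes]

-- membership of the head in B's seven-element set, as a plain disjunction
theorem pv_singles_iff (x : List Char) :
    (pvSingles.contains x = true)
      ↔ (x = ".git".toList ∨ x = "node_modules".toList ∨ x = "vendor".toList ∨
         x = ".idea".toList ∨ x = ".vscode".toList ∨ x = "storage".toList ∨
         x = ".bpdoctor".toList) := by
  rw [PySem.Set.contains_iff]
  unfold pvSingles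
  rw [PySem.Set.mem_ofList]
  simp

-- B's constant checks answer exactly 'some exclude hits cs'
theorem pv_B_iff (cs : List Char) :
    ((if pvSingles.contains (pvPartSlash cs).1 then true
      else if (pvPartSlash cs).1 != "bootstrap".toList || !(pvPartSlash cs).2.1 then false
      else ((pvPartSlash (pvPartSlash cs).2.2).1 == "cache".toList)) = true)
      ↔ ∃ exc ∈ pvAllExcludes, pvHit exc cs := by
  rw [pv_all_iff,
    ← pv_tw_hit ".git".toList (by decide) cs,
    ← pv_tw_hit "node_modules".toList (by decide) cs,
    ← pv_tw_hit "vendor".toList (by decide) cs,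
    ← pv_tw_hit ".idea".toList (by decide) cs,
    ← pv_tw_hit ".vscode".toList (by decide) cs,
    ← pv_tw_hit "storage".toList (by decide) cs,
    ← pv_tw_hit ".bpdoctor".toList (by decide) cs,
    pv_hit2 cs]
  cases hd : cs.dropWhile (fun c => decide (c ≠ '/')) with
  | nil =>
    have hps : pvPartSlash cs = (cs.takeWhile (fun c => decide (c ≠ '/')), false, []) := by
      unfold pvPartSlash
      rw [hd]
    rw [hps]
    by_cases hc : pvSingles.contains (cs.takeWhile (fun c => decide (c ≠ '/'))) = true
    · refine iff_of_true (by rw [if_pos hc]) ?_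
      rcases (pv_singles_iff _).mp hc with h | h | h | h | h | h | h
      · exact Or.inl h
      · exact Or.inr (Or.inl h)
      · exact Or.inr (Or.inr (Or.inl h))
      · exact Or.inr (Or.inr (Or.inr (Or.inl h)))
      · exact Or.inr (Or.inr (Or.inr (Or.inr (Or.inl h))))
      · exact Or.inr (Or.inr (Or.inr (Or.inr (Or.inr (Or.inl h)))))
      · exact Or.inr (Or.inr (Or.inr (Or.inr (Or.inr (Or.inr (Or.inr h))))))
    · have hcf : pvSingles.contains (cs.takeWhile (fun c => decide (c ≠ '/'))) = false := by
        revert hc; cases pvSingles.contains (cs.takeWhile (fun c => decide (c ≠ '/'))) <;> simp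
      refine iff_of_false (by rw [if_neg hc, if_pos (by simp)]; exact Bool.false_ne_true) ?_
      rintro (h | h | h | h | h | h | ⟨hb1, r0, hr0, h3⟩ | h)
      · exact hc ((pv_singles_iff _).mpr (Or.inl h))
      · exact hc ((pv_singles_iff _).mpr (Or.inr (Or.inl h)))
      · exact hc ((pv_singles_iff _).mpr (Or.inr (Or.inr (Or.inl h))))
      · exact hc ((pv_singles_iff _).mpr (Or.inr (Or.inr (Or.inr (Or.inl h)))))
      · exact hc ((pv_singles_iff _).mpr (Or.inr (Or.inr (Or.inr (Or.inr (Or.inl h))))))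
      · exact hc ((pv_singles_iff _).mpr (Or.inr (Or.inr (Or.inr (Or.inr (Or.inr (Or.inl h)))))))
      · exact List.cons_ne_nil _ _ hr0.symm
      · exact hc ((pv_singles_iff _).mpr (Or.inr (Or.inr (Or.inr (Or.inr (Or.inr (Or.inr h)))))))
  | cons x r =>
    obtain rfl : x = '/' := pv_drop_head cs x r hd
    have hps : pvPartSlash cs = (cs.takeWhile (fun c => decide (c ≠ '/')), true, r) := by
      unfold pvPartSlash
      rw [hd]
    rw [hps]
    by_cases hc : pvSingles.contains (cs.takeWhile (fun c => decide (c ≠ '/'))) = true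
    · refine iff_of_true (by rw [if_pos hc]) ?_
      rcases (pv_singles_iff _).mp hc with h | h | h | h | h | h | h
      · exact Or.inl h
      · exact Or.inr (Or.inl h)
      · exact Or.inr (Or.inr (Or.inl h))
      · exact Or.inr (Or.inr (Or.inr (Or.inl h)))
      · exact Or.inr (Or.inr (Or.inr (Or.inr (Or.inl h))))
      · exact Or.inr (Or.inr (Or.inr (Or.inr (Or.inr (Or.inl h)))))
      · exact Or.inr (Or.inr (Or.inr (Or.inr (Or.inr (Or.inr (Or.inr h))))))
    · have hcf : pvSingles.contains (cs.takeWhile (fun c => decide (c ≠ '/'))) = false := by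
        revert hc; cases pvSingles.contains (cs.takeWhile (fun c => decide (c ≠ '/'))) <;> simp
      by_cases hbs : cs.takeWhile (fun c => decide (c ≠ '/')) = "bootstrap".toList
      · rw [if_neg hc,
          if_neg (by simp only [Bool.not_true, Bool.or_false, bne_iff_ne, ne_eq, not_not]; exact hbs),
          pv_part_fst, beq_iff_eq]
        constructor
        · intro h3
          exact Or.inr (Or.inr (Or.inr (Or.inr (Or.inr (Or.inr (Or.inl ⟨hbs, r, rfl, h3⟩))))))
        · rintro (h | h | h | h | h | h | ⟨hb1, r0, hr0, h3⟩ | h)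
          · exact absurd ((pv_singles_iff _).mpr (Or.inl h)) hc
          · exact absurd ((pv_singles_iff _).mpr (Or.inr (Or.inl h))) hc
          · exact absurd ((pv_singles_iff _).mpr (Or.inr (Or.inr (Or.inl h)))) hc
          · exact absurd ((pv_singles_iff _).mpr (Or.inr (Or.inr (Or.inr (Or.inl h))))) hc
          · exact absurd ((pv_singles_iff _).mpr (Or.inr (Or.inr (Or.inr (Or.inr (Or.inl h)))))) hc
          · exact absurd ((pv_singles_iff _).mpr (Or.inr (Or.inr (Or.inr (Or.inr (Or.inr (Or.inl h))))))) hc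
          · injection hr0 with _ hr0
            show List.takeWhile (fun c => decide (c ≠ '/')) r = "cache".toList
            rw [hr0]
            exact h3
          · exact absurd ((pv_singles_iff _).mpr (Or.inr (Or.inr (Or.inr (Or.inr (Or.inr (Or.inr h))))))) hc
      · refine iff_of_false (by
          rw [if_neg hc, if_pos (by
            simp only [Bool.not_true, Bool.or_false]
            rw [bne_iff_ne]
            exact hbs)]
          exact Bool.false_ne_true) ?_
        rintro (h | h | h | h | h | h | ⟨hb1, r0, hr0, h3⟩ | h)
        · exact hc ((pv_singles_iff _).mpr (Or.inl h))
        · exact hc ((pv_singles_iff _).mpr (Or.inr (Or.inl h)))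
        · exact hc ((pv_singles_iff _).mpr (Or.inr (Or.inr (Or.inl h))))
        · exact hc ((pv_singles_iff _).mpr (Or.inr (Or.inr (Or.inr (Or.inl h)))))
        · exact hc ((pv_singles_iff _).mpr (Or.inr (Or.inr (Or.inr (Or.inr (Or.inl h))))))
        · exact hc ((pv_singles_iff _).mpr (Or.inr (Or.inr (Or.inr (Or.inr (Or.inr (Or.inl h)))))))
        · exact hbs hb1
        · exact hc ((pv_singles_iff _).mpr (Or.inr (Or.inr (Or.inr (Or.inr (Or.inr (Or.inr h)))))))

theorem is_excluded_py_eq_alt (rel : String) :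
    is_excluded_py rel = is_excluded_py_alt rel := by
  simp only [is_excluded_py, is_excluded_py_alt]
  generalize PySem.Chars.stripChars (PySem.Chars.replace rel.toList ['\\'] ['/']) ['/'] = cs
  by_cases hcs : cs.isEmpty
  · simp [hcs]
  · simp only [hcs, Bool.false_eq_true, if_false]
    rw [Bool.eq_iff_iff, pv_A_iff, ← pv_B_iff]

-- ===== VERDICT (by name: the statement is the Claim_ definition above) =====
theorem is_excluded_py_spec : Claim_equal_is_excluded_py := by
  intro rel _
  unfold Spec_is_excluded_py
  exact is_excluded_py_eq_alt rel
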